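-- pv_equiv track=rewrite | github.com/tkddnjs98/Python-alorithm | swaparray.py | swaparray
-- ===== SOURCE A (Python) =====
-- def swaparray(array,low,high):
--     i=low
--     j=high
--     if i>=j:
--         return array
--     else:
--         array[i],array[j]=array[j],array[i]
--         return swaparray(array,low+1,high-1)
-- ===== SOURCE B (Python) =====
-- def swaparray(array, low, high):
--     i, j = low, high
--     while i < j:
--         array[i], array[j] = array[j], array[i]
--         i += 1
--         j -= 1
--     return array
-- ===== Notes on version B (the rewrite author's own statement) =====
-- stated objective: simpler
-- what changed: Replaces the recursive call per swap with an explicit two-pointer while loop (iterative decomposition, no recursion depth limit), same swaps in the same order.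
import Mathlib
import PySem

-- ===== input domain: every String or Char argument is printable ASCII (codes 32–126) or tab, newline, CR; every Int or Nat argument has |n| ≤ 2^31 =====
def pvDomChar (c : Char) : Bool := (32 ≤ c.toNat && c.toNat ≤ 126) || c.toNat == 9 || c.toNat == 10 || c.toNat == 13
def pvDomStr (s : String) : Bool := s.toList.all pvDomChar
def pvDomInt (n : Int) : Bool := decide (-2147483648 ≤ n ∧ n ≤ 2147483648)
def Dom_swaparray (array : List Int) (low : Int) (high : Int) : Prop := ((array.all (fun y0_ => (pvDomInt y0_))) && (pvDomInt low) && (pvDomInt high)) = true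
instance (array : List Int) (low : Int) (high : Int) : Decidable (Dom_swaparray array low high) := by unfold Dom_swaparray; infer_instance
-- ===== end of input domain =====

-- B replaces A's recursion with an explicit two-pointer while loop (iterative decomposition);
-- both Pythons mutate `array` in place identically and return it, so the return-value equivalence
-- proved here coincides with the side effect.

-- ===== PORT A =====
-- literal port of A: if i >= j return array, else swap array[i],array[j] and recurse on (low+1, high-1)
def swaparray (array : List Int) (low : Int) (high : Int) : List Int :=
  if low ≥ high then array
  else
    let vj := PySem.List.pyGetD array high 0
    let vi := PySem.List.pyGetD array low 0
    let a2 := PySem.List.pySetD (PySem.List.pySetD array low vj) high vi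
    swaparray a2 (low + 1) (high - 1)
termination_by (high - low).toNat
decreasing_by omega

-- ===== PORT B =====
-- the while loop of Source B: state (array, i, j), swap and converge while i < j, then return array
def swapLoop (array : List Int) (i : Int) (j : Int) : List Int :=
  if i < j then
    swapLoop
      (PySem.List.pySetD (PySem.List.pySetD array i (PySem.List.pyGetD array j 0)) j
        (PySem.List.pyGetD array i 0))
      (i + 1) (j - 1)
  else array
termination_by (j - i).toNat
decreasing_by omega

def swaparray_alt (array : List Int) (low : Int) (high : Int) : List Int :=
  swapLoop array low high

-- ===== PRECONDITION & SPEC =====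
-- Pre_ excludes exactly the inputs where A raises IndexError: a swap is attempted (low < high)
-- with low or high outside Python's valid index range; every index the recursion touches lies
-- between low and high, so this condition is exact.
def Pre_swaparray (array : List Int) (low : Int) (high : Int) : Prop :=
  low ≥ high ∨ (PySem.Raise.InRange array.length low ∧ PySem.Raise.InRange array.length high)
instance (array : List Int) (low : Int) (high : Int) : Decidable (Pre_swaparray array low high) := by unfold Pre_swaparray; infer_instance

def pvWitness_swaparray : List Int × Int × Int := ([1, 2, 3, 4], 0, 3)

def Spec_swaparray (array : List Int) (low : Int) (high : Int) (out : List Int) : Prop := out = swaparray_alt array low high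
instance (array : List Int) (low : Int) (high : Int) (out : List Int) : Decidable (Spec_swaparray array low high out) := by unfold Spec_swaparray; infer_instance

-- ===== CLAIM (what is proved, stated in full; the proofs are below) =====
def Claim_equal_swaparray : Prop := ∀ (array : List Int) (low : Int) (high : Int), Dom_swaparray array low high → Pre_swaparray array low high → Spec_swaparray array low high (swaparray array low high)

-- ===== LEMMAS AND PROOFS =====
-- A's recursion and B's loop perform the same swaps in the same order on the same state.
theorem swaparray_eq_swapLoop (array : List Int) (low high : Int) :
    swaparray array low high = swapLoop array low high := by
  induction array, low, high using swaparray.induct with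
  | case1 array low high h =>
      rw [swaparray, swapLoop]
      rw [if_pos h, if_neg (not_lt.mpr h)]
  | case2 array low high h vj vi a2 ih =>
      rw [swaparray, swapLoop]
      simp only [h, if_false, if_pos (by omega : low < high)]
      exact ih

-- ===== VERDICT (by name: the statement is the Claim_ definition above) =====
theorem swaparray_spec : Claim_equal_swaparray := by
  intro array low high _ _
  unfold Spec_swaparray swaparray_alt
  exact swaparray_eq_swapLoop array low high
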